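-- pv_equiv track=rewrite | github.com/notvivi/HackerBankNode | src/application/services/robbery_planner.py | plan_robbery
-- ===== SOURCE A (Python) =====
-- def plan_robbery(banks: list[dict], target: int) -> list[dict]:
--     banks = sorted(
--         banks,
--         key=lambda b: (b["clients"], -b["total"])
--     )
--
--     selected = []
--     total = 0
--
--     for bank in banks:
--         selected.append(bank)
--         total += bank["total"]
--
--         if total >= target:
--             return selected
--
--     return []
-- ===== SOURCE B (Python) =====
-- def plan_robbery(banks: list[dict], target: int) -> list[dict]:
--     # Selection-based greedy: no sort; repeatedly extract the best remaining bank.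
--     remaining = list(banks)
--     selected = []
--     total = 0
--     while remaining:
--         bank = min(remaining, key=lambda b: (b["clients"], -b["total"]))
--         remaining.remove(bank)
--         selected.append(bank)
--         total += bank["total"]
--         if total >= target:
--             return selected
--     return []
-- ===== Notes on version B (the rewrite author's own statement) =====
-- stated objective: alternative
-- what changed: B never sorts: it is a selection-based greedy that repeatedly extracts the minimum-key bank from the remaining pool with min()+remove, accumulating until the target is reached, instead of A's sort-then-prefix loop; equal because a stable sort is exactly repeated first-minimum extraction.
import Mathlib
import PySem

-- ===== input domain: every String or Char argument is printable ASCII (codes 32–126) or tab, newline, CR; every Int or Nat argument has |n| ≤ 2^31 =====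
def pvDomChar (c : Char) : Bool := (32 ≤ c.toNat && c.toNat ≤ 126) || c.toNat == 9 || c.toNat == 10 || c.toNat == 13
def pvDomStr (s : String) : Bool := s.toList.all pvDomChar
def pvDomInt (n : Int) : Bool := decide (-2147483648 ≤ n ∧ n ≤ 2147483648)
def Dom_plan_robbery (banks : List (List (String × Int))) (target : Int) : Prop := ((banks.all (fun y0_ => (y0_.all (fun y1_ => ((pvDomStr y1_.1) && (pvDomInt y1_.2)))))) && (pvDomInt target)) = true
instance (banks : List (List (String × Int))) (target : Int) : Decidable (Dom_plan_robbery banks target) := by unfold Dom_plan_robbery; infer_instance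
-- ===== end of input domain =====

-- B replaces A's sort-then-prefix loop by a sort-free selection greedy (min()+remove
-- until the target is reached); an alternative decomposition, not a speed change.

-- b["k"] on an association list: first matching value (keys are unique under Pre_)
def bankGet (b : List (String × Int)) (k : String) : Int :=
  ((b.find? (fun p => p.1 == k)).map (fun p => p.2)).getD 0

-- ===== PORT A =====
-- A's for-loop: grow 'selected', accumulate 'total', early return when total >= target
def planLoopA (target : Int) : List (List (String × Int)) → List (List (String × Int)) → Int → List (List (String × Int))
  | [], _, _ => []
  | bank :: rest, selected, total =>
    let selected' := selected ++ [bank]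
    let total' := total + bankGet bank "total"
    if total' ≥ target then selected' else planLoopA target rest selected' total'

def plan_robbery (banks : List (List (String × Int))) (target : Int) : List (List (String × Int)) :=
  let banks' := PySem.List.sorted2 banks (fun b => bankGet b "clients") (fun b => -(bankGet b "total"))
  planLoopA target banks' [] 0

-- ===== PORT B =====
-- remove? shrinks the list by one (used only by planLoopB's termination argument)
theorem remove?_length (xs r : List (List (String × Int))) (v : List (String × Int))
    (h : PySem.List.remove? xs v = some r) : r.length < xs.length := by
  by_cases hv : v ∈ xs
  · rw [PySem.List.remove?_eq_some_erase xs v hv] at h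
    cases h
    have h1 := List.length_erase_of_mem hv
    have h2 : 0 < xs.length := List.length_pos_of_mem hv
    omega
  · rw [(PySem.List.remove?_eq_none_iff xs v).mpr hv] at h
    simp at h

-- B's while-loop: bank = min(remaining, key=...); remaining.remove(bank); accumulate
def planLoopB (target : Int) (remaining selected : List (List (String × Int))) (total : Int) :
    List (List (String × Int)) :=
  match PySem.List.min2? remaining (fun b => bankGet b "clients") (fun b => -(bankGet b "total")) with
  | none => []          -- remaining is empty: the while loop exits, return []
  | some bank =>
    match _h2 : PySem.List.remove? remaining bank with
    | none => []        -- unreachable: bank ∈ remaining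
    | some rest =>
      let selected' := selected ++ [bank]
      let total' := total + bankGet bank "total"
      if total' ≥ target then selected' else planLoopB target rest selected' total'
termination_by remaining.length
decreasing_by exact remove?_length _ _ _ _h2

def plan_robbery_alt (banks : List (List (String × Int))) (target : Int) : List (List (String × Int)) :=
  planLoopB target banks [] 0

-- ===== PRECONDITION & SPEC =====
-- Pre_ excludes banks missing a "clients" or "total" key (A raises KeyError there) and
-- banks whose association lists repeat a key, which a Python dict cannot represent.
def Pre_plan_robbery (banks : List (List (String × Int))) (_target : Int) : Prop :=
  ∀ b ∈ banks, (b.map (fun p => p.1)).Nodup ∧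
    "clients" ∈ b.map (fun p => p.1) ∧ "total" ∈ b.map (fun p => p.1)
instance (banks : List (List (String × Int))) (target : Int) : Decidable (Pre_plan_robbery banks target) := by
  unfold Pre_plan_robbery; infer_instance

def pvWitness_plan_robbery : (List (List (String × Int))) × Int :=
  ([[("clients", 2), ("total", 3)], [("clients", 1), ("total", 5)]], 4)

def Spec_plan_robbery (banks : List (List (String × Int))) (target : Int) (out : List (List (String × Int))) : Prop := out = plan_robbery_alt banks target
instance (banks : List (List (String × Int))) (target : Int) (out : List (List (String × Int))) : Decidable (Spec_plan_robbery banks target out) := by unfold Spec_plan_robbery; infer_instance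

-- ===== CLAIM (what is proved, stated in full; the proofs are below) =====
def Claim_equal_plan_robbery : Prop := ∀ (banks : List (List (String × Int))) (target : Int), Dom_plan_robbery banks target → Pre_plan_robbery banks target → Spec_plan_robbery banks target (plan_robbery banks target)

-- ===== LEMMAS AND PROOFS =====

-- the Bool comparison both ports' key (clients, -total) induces, lexicographically
def ltB (a b : List (String × Int)) : Bool :=
  decide (bankGet a "clients" < bankGet b "clients") ||
    (!decide (bankGet b "clients" < bankGet a "clients") &&
      decide (-(bankGet a "total") < -(bankGet b "total")))

theorem ltB_trans {a b c : List (String × Int)} (h1 : ltB a b) (h2 : ltB b c) : ltB a c := by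
  simp only [ltB, Bool.or_eq_true, Bool.and_eq_true, Bool.not_eq_true', decide_eq_true_eq,
    decide_eq_false_iff_not] at *
  omega

theorem ltB_asymm {a b : List (String × Int)} (h : ltB a b) : ltB b a = false := by
  simp only [ltB, Bool.or_eq_true, Bool.and_eq_true, Bool.not_eq_true', decide_eq_true_eq,
    decide_eq_false_iff_not] at h
  simp only [ltB, Bool.or_eq_false_iff, Bool.and_eq_false_iff, decide_eq_false_iff_not,
    Bool.not_eq_false', decide_eq_true_eq]
  omega

theorem ltB_irrefl (a : List (String × Int)) : ltB a a = false := by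
  simp only [ltB, Bool.or_eq_false_iff, Bool.and_eq_false_iff, decide_eq_false_iff_not,
    Bool.not_eq_false', decide_eq_true_eq]
  omega

-- min2? with our keys is the fold that keeps the FIRST ltB-minimal element
def fminStep (acc : Option (List (String × Int))) (x : List (String × Int)) :
    Option (List (String × Int)) :=
  match acc with
  | none => some x
  | some m => if ltB x m then some x else some m

theorem min2?_eq_foldl (xs : List (List (String × Int))) :
    PySem.List.min2? xs (fun b => bankGet b "clients") (fun b => -(bankGet b "total")) =
      xs.foldl fminStep none := by
  unfold PySem.List.min2? fminStep ltB
  congr 1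
  funext acc x
  cases acc <;> rfl

-- the fold's invariant: the running minimum is a member no seen element is ltB-below
theorem foldl_fminStep_some (xs : List (List (String × Int))) :
    ∀ (m0 : List (String × Int)),
      ∃ m, xs.foldl fminStep (some m0) = some m ∧ (m = m0 ∨ m ∈ xs) ∧
        (∀ z ∈ xs, ltB z m = false) ∧ (ltB m m0 = true ∨ m = m0) := by
  induction xs with
  | nil => exact fun m0 => ⟨m0, rfl, Or.inl rfl, by simp, Or.inr rfl⟩
  | cons x rest ih =>
    intro m0
    simp only [List.foldl_cons, fminStep]
    by_cases hx : ltB x m0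
    · rw [if_pos hx]
      obtain ⟨m, hf, hmem, hall, hlt⟩ := ih x
      refine ⟨m, hf, ?_, ?_, ?_⟩
      · rcases hmem with h | h
        · exact Or.inr (h ▸ List.mem_cons_self)
        · exact Or.inr (List.mem_cons_of_mem _ h)
      · intro z hz
        rcases List.mem_cons.mp hz with h | h
        · subst h
          rcases hlt with h' | h'
          · exact ltB_asymm h'
          · subst h'; exact ltB_irrefl _
        · exact hall z h
      · rcases hlt with h' | h'
        · exact Or.inl (ltB_trans h' hx)
        · subst h'; exact Or.inl hx
    · rw [if_neg hx]
      obtain ⟨m, hf, hmem, hall, hlt⟩ := ih m0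
      refine ⟨m, hf, ?_, ?_, hlt⟩
      · rcases hmem with h | h
        · exact Or.inl h
        · exact Or.inr (List.mem_cons_of_mem _ h)
      · intro z hz
        rcases List.mem_cons.mp hz with h | h
        · subst h
          rcases hlt with h' | h'
          · by_contra hc
            have : ltB z m0 = true := ltB_trans (by simpa using hc) h'
            exact hx this
          · subst h'; exact Bool.eq_false_iff.mpr hx
        · exact hall z h

-- min(xs) on a nonempty list: the first minimal element; nothing is ltB-below it
theorem min2?_spec (x : List (String × Int)) (xs : List (List (String × Int))) :
    ∃ m, PySem.List.min2? (x :: xs) (fun b => bankGet b "clients") (fun b => -(bankGet b "total")) = some m ∧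
      m ∈ x :: xs ∧ ∀ z ∈ x :: xs, ltB z m = false := by
  rw [min2?_eq_foldl]
  simp only [List.foldl_cons, fminStep]
  obtain ⟨m, hf, hmem, hall, hlt⟩ := foldl_fminStep_some xs x
  refine ⟨m, hf, ?_, ?_⟩
  · rcases hmem with h | h
    · exact h ▸ List.mem_cons_self
    · exact List.mem_cons_of_mem _ h
  · intro z hz
    rcases List.mem_cons.mp hz with h | h
    · subst h
      rcases hlt with h' | h'
      · exact ltB_asymm h'
      · subst h'; exact ltB_irrefl _
    · exact hall z h

-- insertion sort with ltB, the body of sorted2 for these keys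
def isortB (xs : List (List (String × Int))) : List (List (String × Int)) :=
  xs.foldl (fun acc x => PySem.List.insertBy ltB x acc) []

theorem sorted2_eq_isortB (xs : List (List (String × Int))) :
    PySem.List.sorted2 xs (fun b => bankGet b "clients") (fun b => -(bankGet b "total")) = isortB xs := by
  unfold PySem.List.sorted2 isortB ltB
  congr 1

theorem isortB_append_singleton (xs : List (List (String × Int))) (y : List (String × Int)) :
    isortB (xs ++ [y]) = PySem.List.insertBy ltB y (isortB xs) := by
  simp [isortB]

-- KEY LEMMA: the stable sort is repeated first-minimum extraction
theorem isortB_eq_min_cons (xs : List (List (String × Int))) :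
    ∀ (m : List (String × Int)),
      PySem.List.min2? xs (fun b => bankGet b "clients") (fun b => -(bankGet b "total")) = some m →
      isortB xs = m :: isortB (xs.erase m) := by
  induction xs using List.reverseRecOn with
  | nil => intro m hm; rw [min2?_eq_foldl] at hm; simp at hm
  | append_singleton ys y ih =>
    intro m hm
    cases ys with
    | nil =>
      rw [min2?_eq_foldl] at hm
      simp only [List.nil_append, List.foldl_cons, List.foldl_nil, fminStep] at hm
      cases hm
      simp [isortB, PySem.List.insertBy]
    | cons x xs' =>
      obtain ⟨m0, hm0, hm0mem, hm0all⟩ := min2?_spec x xs'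
      rw [min2?_eq_foldl, List.foldl_append, ← min2?_eq_foldl, hm0] at hm
      simp only [List.foldl_cons, List.foldl_nil, fminStep] at hm
      by_cases hy : ltB y m0
      · rw [if_pos hy] at hm
        injection hm with hm
        subst hm
        have hynot : y ∉ (x :: xs') := by
          intro hc
          have := hm0all y hc
          rw [this] at hy
          exact Bool.noConfusion hy
        rw [isortB_append_singleton, ih m0 hm0, List.erase_append_right _ hynot,
          List.erase_cons_head, List.append_nil]
        simp only [PySem.List.insertBy, hy, if_pos]
        rw [ih m0 hm0]
      · rw [if_neg hy] at hm
        injection hm with hm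
        subst hm
        rw [isortB_append_singleton, ih m0 hm0, List.erase_append_left _ hm0mem,
          isortB_append_singleton]
        simp [PySem.List.insertBy, hy]

-- the two loops agree: B's extraction order IS the sorted order A walks
theorem planLoopB_eq_planLoopA (target : Int) :
    ∀ (n : Nat) (xs sel : List (List (String × Int))) (tot : Int), xs.length ≤ n →
      planLoopB target xs sel tot = planLoopA target (isortB xs) sel tot := by
  intro n
  induction n with
  | zero =>
    intro xs sel tot hlen
    have hx : xs = [] := List.length_eq_zero_iff.mp (Nat.le_zero.mp hlen)
    subst hx
    rw [planLoopB]
    simp [min2?_eq_foldl, isortB, planLoopA]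
  | succ k ih =>
    intro xs sel tot hlen
    cases xs with
    | nil =>
      rw [planLoopB]
      simp [min2?_eq_foldl, isortB, planLoopA]
    | cons x rest =>
      obtain ⟨m, hm, hmem, _⟩ := min2?_spec x rest
      have hrem : PySem.List.remove? (x :: rest) m = some ((x :: rest).erase m) :=
        PySem.List.remove?_eq_some_erase _ _ hmem
      rw [planLoopB, hm, isortB_eq_min_cons (x :: rest) m hm]
      split
      · next heq => simp at heq
      · next r heq =>
          injection heq with heq
          subst heq
          split
          · next heq2 =>
              rw [hrem] at heq2
              simp at heq2
          · next rest1 heq2 =>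
              rw [hrem] at heq2
              injection heq2 with heq2
              subst heq2
              simp only [planLoopA]
              by_cases hge : tot + bankGet m "total" ≥ target
              · simp [hge]
              · simp only [hge, if_false]
                refine ih _ _ _ ?_
                have h1 := List.length_erase_of_mem hmem
                simp only [List.length_cons] at *
                omega

-- ===== VERDICT (by name: the statement is the Claim_ definition above) =====
theorem plan_robbery_spec : Claim_equal_plan_robbery := by
  intro banks target _ _
  unfold Spec_plan_robbery plan_robbery plan_robbery_alt
  rw [sorted2_eq_isortB]
  exact (planLoopB_eq_planLoopA target banks.length banks [] 0 (le_refl _)).symm
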